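-- pv_equiv track=rewrite | github.com/swjung2606/Machine-Learning | assignment02_MissingData_Outlier.py | color_collections
-- ===== SOURCE A (Python) =====
-- def color_collections(data,fruitname: str):
--     Green = 0
--     Red = 0
--     Yellow = 0
--     for i in data:
--         if i[3] == fruitname:
--             if i[0] == "Green":
--                 Green += 1
--             elif i[0] == "Red":
--                 Red += 1
--             elif i[0] == "Yellow":
--                 Yellow += 1
--
--     return [Green, Red, Yellow]
-- ===== SOURCE B (Python) =====
-- def _leaf(row, fruitname):
--     hit = row[3] == fruitname
--     return [int(hit and row[0] == c) for c in ("Green", "Red", "Yellow")]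
--
--
-- def color_collections(data, fruitname: str):
--     # Divide and conquer: map each row to a 0/1 indicator vector over
--     # (Green, Red, Yellow) and combine halves by elementwise vector addition.
--     if not data:
--         return [0, 0, 0]
--     if len(data) == 1:
--         return _leaf(data[0], fruitname)
--     mid = len(data) // 2
--     left = color_collections(data[:mid], fruitname)
--     right = color_collections(data[mid:], fruitname)
--     return [a + b for a, b in zip(left, right)]
-- ===== Notes on version B (the rewrite author's own statement) =====
-- stated objective: alternative
-- what changed: A's single accumulating pass with an if/elif chain over three counters is replaced by a divide-and-conquer: each single row is mapped to a 0/1 indicator vector over (Green, Red, Yellow), and halves are combined by elementwise vector addition.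
import Mathlib
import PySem

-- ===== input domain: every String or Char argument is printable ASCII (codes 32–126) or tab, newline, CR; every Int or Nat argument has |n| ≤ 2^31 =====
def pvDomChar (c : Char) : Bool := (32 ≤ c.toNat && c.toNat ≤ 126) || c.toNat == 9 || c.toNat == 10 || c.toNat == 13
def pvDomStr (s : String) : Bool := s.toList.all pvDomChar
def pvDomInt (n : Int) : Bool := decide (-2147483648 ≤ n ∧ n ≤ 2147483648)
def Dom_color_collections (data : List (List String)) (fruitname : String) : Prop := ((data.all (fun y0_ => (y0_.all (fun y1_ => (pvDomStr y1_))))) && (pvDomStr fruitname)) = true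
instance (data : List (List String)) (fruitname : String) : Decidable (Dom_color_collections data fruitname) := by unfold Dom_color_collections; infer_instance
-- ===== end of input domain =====

-- B replaces A's single accumulating pass (if/elif chain over three counters) by a
-- divide-and-conquer: each row becomes a 0/1 indicator vector over (Green, Red, Yellow)
-- and halves are combined by elementwise vector addition. Objective: alternative.

-- ===== PORT A =====
def color_collections (data : List (List String)) (fruitname : String) : List Int :=
  let s := data.foldl (fun (acc : Int × Int × Int) i =>
      if PySem.List.pyGetD i 3 "" == fruitname then
        if PySem.List.pyGetD i 0 "" == "Green" then (acc.1 + 1, acc.2.1, acc.2.2)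
        else if PySem.List.pyGetD i 0 "" == "Red" then (acc.1, acc.2.1 + 1, acc.2.2)
        else if PySem.List.pyGetD i 0 "" == "Yellow" then (acc.1, acc.2.1, acc.2.2 + 1)
        else acc
      else acc) (0, 0, 0)
  [s.1, s.2.1, s.2.2]

-- ===== PORT B =====
-- _leaf: the 0/1 indicator vector of one row over ("Green", "Red", "Yellow")
def pvLeaf (row : List String) (fruitname : String) : List Int :=
  let hit := PySem.List.pyGetD row 3 "" == fruitname
  ["Green", "Red", "Yellow"].map (fun c => if hit && (PySem.List.pyGetD row 0 "" == c) then (1 : Int) else 0)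

def color_collections_alt (data : List (List String)) (fruitname : String) : List Int :=
  if data.length = 0 then [0, 0, 0]
  else if data.length = 1 then pvLeaf (PySem.List.pyGetD data 0 []) fruitname
  else
    let mid : Nat := data.length / 2
    let left := color_collections_alt (PySem.List.slice data none (some (mid : Int))) fruitname
    let right := color_collections_alt (PySem.List.slice data (some (mid : Int)) none) fruitname
    List.zipWith (· + ·) left right
termination_by data.length
decreasing_by
  · simp only [PySem.List.slice_to_natCast, List.length_take]; omega
  · simp only [PySem.List.slice_from_natCast, List.length_drop]; omega

-- ===== PRECONDITION & SPEC =====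
-- Pre_ excludes exactly the inputs on which Python A raises IndexError (a row with
-- fewer than 4 entries); B raises there too.
def Pre_color_collections (data : List (List String)) (fruitname : String) : Prop :=
  ∀ row ∈ data, 4 ≤ row.length
instance (data : List (List String)) (fruitname : String) : Decidable (Pre_color_collections data fruitname) := by unfold Pre_color_collections; infer_instance

def pvWitness_color_collections : List (List String) × String :=
  ([["Green", "a", "b", "apple"], ["Red", "a", "b", "pear"]], "apple")

def Spec_color_collections (data : List (List String)) (fruitname : String) (out : List Int) : Prop := out = color_collections_alt data fruitname
instance (data : List (List String)) (fruitname : String) (out : List Int) : Decidable (Spec_color_collections data fruitname out) := by unfold Spec_color_collections; infer_instance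

-- ===== CLAIM (what is proved, stated in full; the proofs are below) =====
def Claim_equal_color_collections : Prop := ∀ (data : List (List String)) (fruitname : String), Dom_color_collections data fruitname → Pre_color_collections data fruitname → Spec_color_collections data fruitname (color_collections data fruitname)

-- ===== LEMMAS AND PROOFS =====

-- The triple of counts both programs compute, as a closed characterisation.
def pvCounts (data : List (List String)) (fruitname : String) : List Int :=
  let cols := (data.filter (fun row => PySem.List.pyGetD row 3 "" == fruitname)).map
      (fun row => PySem.List.pyGetD row 0 "")
  [(cols.count "Green" : Int), (cols.count "Red" : Int), (cols.count "Yellow" : Int)]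

theorem pvCounts_append (l r : List (List String)) (f : String) :
    pvCounts (l ++ r) f = List.zipWith (· + ·) (pvCounts l f) (pvCounts r f) := by
  simp [pvCounts, List.count_append]

-- B computes pvCounts (strong induction following B's own recursion).
theorem alt_eq_counts (data : List (List String)) (f : String) :
    color_collections_alt data f = pvCounts data f := by
  fun_induction color_collections_alt data f with
  | case1 data h0 =>
    have : data = [] := List.length_eq_zero_iff.mp h0
    subst this; simp [pvCounts]
  | case2 data h0 h1 =>
    obtain ⟨r, rfl⟩ := List.length_eq_one_iff.mp h1
    simp only [pvLeaf, pvCounts, List.map_cons, List.map_nil, List.filter_cons,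
      List.filter_nil, PySem.List.pyGetD_zero_cons]
    by_cases h : (PySem.List.pyGetD r 3 "" == f) = true <;>
      simp [h, List.count_cons, List.count_nil]
  | case3 data h0 h1 mid left right ihr ihl =>
    simp only [left, right, ihl, ihr]
    rw [PySem.List.slice_to_natCast, PySem.List.slice_from_natCast]
    rw [← pvCounts_append, List.take_append_drop]

-- A's fold from an arbitrary accumulator adds the three counts of the filtered color list.
theorem color_collections_fold (data : List (List String)) (fruitname : String)
    (g r y : Int) :
    data.foldl (fun (acc : Int × Int × Int) i =>
      if PySem.List.pyGetD i 3 "" == fruitname then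
        if PySem.List.pyGetD i 0 "" == "Green" then (acc.1 + 1, acc.2.1, acc.2.2)
        else if PySem.List.pyGetD i 0 "" == "Red" then (acc.1, acc.2.1 + 1, acc.2.2)
        else if PySem.List.pyGetD i 0 "" == "Yellow" then (acc.1, acc.2.1, acc.2.2 + 1)
        else acc
      else acc) (g, r, y) =
    (let cols := (data.filter (fun row => PySem.List.pyGetD row 3 "" == fruitname)).map
        (fun row => PySem.List.pyGetD row 0 "")
     (g + (PySem.List.count cols "Green" : Int), r + (PySem.List.count cols "Red" : Int),
      y + (PySem.List.count cols "Yellow" : Int))) := by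
  induction data generalizing g r y with
  | nil => simp [PySem.List.count]
  | cons hd tl ih =>
    simp only [List.foldl_cons]
    split_ifs with h1 h2 h3 h4 <;>
      simp_all [PySem.List.count_eq] <;> omega

-- ===== VERDICT (by name: the statement is the Claim_ definition above) =====
theorem color_collections_spec : Claim_equal_color_collections := by
  intro data fruitname _ _
  unfold Spec_color_collections color_collections
  rw [alt_eq_counts, color_collections_fold]
  simp [pvCounts, PySem.List.count_eq]
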